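-- pv_equiv track=rewrite | github.com/skidmarker/Lamborghini | programmers_고득점_Kit/그리디/조이스틱.py | solution
-- ===== SOURCE A (Python) =====
-- def solution(name):
--     answer = 0
--     target_arr = []
--     target_dict = dict()
--     for i in range(len(name)):
--         if name[i] != 'A':
--             target_arr.append(i)
--             target_dict[i] = False
--     now_pos = 0
--     target_cnt = len(target_arr)
--     while target_cnt > 0:
--         minV = len(name)
--         next_ch = 0
--         for target in target_arr:
--             if target_dict[target] == False:
--                 dis = min(abs(target - now_pos), len(name) - abs(target - now_pos))
--                 if dis < minV:
--                     minV = dis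
--                     next_ch = target
--
--         answer += minV
--         now_pos = next_ch
--         ch = name[next_ch]
--         ch_change = min(ord(ch) - ord('A'), (ord('Z') - ord(ch) + 1))
--         answer += ch_change
--         target_dict[next_ch] = True
--         target_cnt -= 1
--
--     return answer
-- ===== SOURCE B (Python) =====
-- def solution(name):
--     n = len(name)
--     # vertical cost: independent of visiting order, summed in one pass
--     vertical = sum(min(ord(c) - ord('A'), ord('Z') - ord(c) + 1)
--                    for c in name if c != 'A')
--     # horizontal cost: walk to the nearer circular neighbour among the
--     # remaining targets, deleting targets as they are visited
--     rem = [i for i in range(n) if name[i] != 'A']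
--     pos = 0
--     horiz = 0
--     while rem:
--         k = 0
--         while k < len(rem) and rem[k] < pos:
--             k += 1
--         succ = rem[k] if k < len(rem) else rem[0]
--         pred = rem[k - 1] if k > 0 else rem[-1]
--         ds = (succ - pos) % n
--         ds = min(ds, n - ds)
--         dp = (pos - pred) % n
--         dp = min(dp, n - dp)
--         if ds < dp:
--             chosen, d = succ, ds
--         elif dp < ds:
--             chosen, d = pred, dp
--         else:
--             chosen, d = min(succ, pred), ds
--         horiz += d
--         pos = chosen
--         rem.remove(chosen)
--     return vertical + horiz
-- ===== Notes on version B (the rewrite author's own statement) =====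
-- stated objective: faster
-- what changed: B sums the vertical (letter-change) cost in one upfront pass and computes the horizontal cost by walking to the nearer of the two circular neighbours of the current position in a shrinking sorted list of remaining targets, instead of A's per-step argmin scan over all targets with a visited-flag dict.
import Mathlib
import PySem

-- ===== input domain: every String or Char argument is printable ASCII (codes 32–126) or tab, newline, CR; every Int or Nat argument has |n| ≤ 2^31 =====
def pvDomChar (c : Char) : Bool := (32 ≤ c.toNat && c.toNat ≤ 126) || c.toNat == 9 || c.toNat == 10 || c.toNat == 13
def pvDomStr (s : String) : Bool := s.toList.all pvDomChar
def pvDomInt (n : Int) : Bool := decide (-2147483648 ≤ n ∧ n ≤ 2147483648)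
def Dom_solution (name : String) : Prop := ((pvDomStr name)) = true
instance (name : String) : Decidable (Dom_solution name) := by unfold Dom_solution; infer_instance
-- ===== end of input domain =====

-- B computes the vertical (letter-change) cost in one upfront pass and the horizontal cost by
-- moving to the nearer circular neighbour in a shrinking sorted list of remaining targets,
-- instead of A's per-step argmin scan over all targets with a visited-flag dict (objective: faster).


-- ===== PORT A =====
-- inner 'for target in target_arr' scan (skips visited targets, keeps the first strict minimum)
def solutionScan (n pos : Int) (d : PySem.Dict Int Bool) (arr : List Int) : Int × Int :=
  arr.foldl (fun st t =>
    if PySem.Dict.getD d t true == false then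
      let dis := min |t - pos| (n - |t - pos|)
      if dis < st.1 then (dis, t) else st
    else st) (n, 0)

-- 'while target_cnt > 0': target_cnt is the structural fuel (A decrements it by exactly 1 per pass)
def solutionLoop (cs : List Char) (arr : List Int) : Nat → Int → Int → PySem.Dict Int Bool → Int
  | 0, answer, _, _ => answer
  | cnt + 1, answer, pos, d =>
    let n : Int := cs.length
    let s := solutionScan n pos d arr
    -- name[next_ch]: the index is always in range on reachable states (next_ch ∈ target_arr)
    let ch := PySem.List.pyGetD cs s.2 'A'
    solutionLoop cs arr cnt
      (answer + s.1 + min ((ch.toNat : Int) - 65) (91 - (ch.toNat : Int)))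
      s.2 (PySem.Dict.insert d s.2 true)

def solution (name : String) : Int :=
  let cs := name.toList
  let init := (List.range cs.length).foldl
    (fun (st : List Int × PySem.Dict Int Bool) i =>
      if cs.getD i 'A' ≠ 'A' then (st.1 ++ [(i : Int)], PySem.Dict.insert st.2 (i : Int) false)
      else st)
    ([], PySem.Dict.empty)
  solutionLoop cs init.1 init.1.length 0 0 init.2

-- ===== PORT B =====
-- 'k = 0; while k < len(rem) and rem[k] < pos: k += 1'
def solutionAltFind (pos : Int) : List Int → Nat
  | [] => 0
  | t :: ts => if t < pos then solutionAltFind pos ts + 1 else 0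

-- 'while rem:' — fuel is len(rem): exactly one target is removed per pass
def solutionAltLoop (n : Int) : Nat → List Int → Int → Int → Int
  | 0, _, _, horiz => horiz
  | fuel + 1, rem, pos, horiz =>
    match rem with
    | [] => horiz
    | _ :: _ =>
      let k := solutionAltFind pos rem
      let succ := if k < rem.length then rem.getD k 0 else rem.getD 0 0
      let pred := if 0 < k then rem.getD (k - 1) 0 else PySem.List.pyGetD rem (-1) 0
      let ds0 := PySem.Int.mod (succ - pos) n
      let ds := min ds0 (n - ds0)
      let dp0 := PySem.Int.mod (pos - pred) n
      let dp := min dp0 (n - dp0)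
      let c := if ds < dp then (succ, ds) else if dp < ds then (pred, dp) else (min succ pred, ds)
      -- rem.remove(chosen): chosen is always present, and list.remove of a present value is erase
      solutionAltLoop n fuel (rem.erase c.1) c.1 (horiz + c.2)

def solution_alt (name : String) : Int :=
  let cs := name.toList
  let vertical := cs.foldl
    (fun acc c => if c ≠ 'A' then acc + min ((c.toNat : Int) - 65) (91 - (c.toNat : Int)) else acc) 0
  let rem := ((List.range cs.length).filter (fun i => cs.getD i 'A' ≠ 'A')).map (fun (i : Nat) => (i : Int))
  vertical + solutionAltLoop (cs.length : Int) rem.length rem 0 0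

-- ===== PRECONDITION & SPEC =====
def Spec_solution (name : String) (out : Int) : Prop := out = solution_alt name
instance (name : String) (out : Int) : Decidable (Spec_solution name out) := by unfold Spec_solution; infer_instance

-- ===== CLAIM (what is proved, stated in full; the proofs are below) =====
def Claim_equal_solution : Prop := ∀ (name : String), Dom_solution name → Spec_solution name (solution name)

-- ===== LEMMAS AND PROOFS =====

-- circular distance A computes for a candidate target, and its clockwise/counterclockwise parts
def circDist (n pos t : Int) : Int := min |t - pos| (n - |t - pos|)
def cwD (n pos t : Int) : Int := if pos ≤ t then t - pos else t - pos + n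
def ccwD (n pos t : Int) : Int := if t ≤ pos then pos - t else pos - t + n

-- vertical cost A adds when visiting index t
def vertAt (cs : List Char) (t : Int) : Int :=
  min (((PySem.List.pyGetD cs t 'A').toNat : Int) - 65) (91 - ((PySem.List.pyGetD cs t 'A').toNat : Int))

-- the body of A's inner scan, with the state exposed
def scanF (n pos : Int) (st : Int × Int) (t : Int) : Int × Int :=
  if min |t - pos| (n - |t - pos|) < st.1 then (min |t - pos| (n - |t - pos|), t) else st

-- B's per-step choice (chosen target, horizontal cost), as computed inside solutionAltLoop
def pickStep (n pos : Int) (rem : List Int) : Int × Int :=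
  let k := solutionAltFind pos rem
  let succ := if k < rem.length then rem.getD k 0 else rem.getD 0 0
  let pred := if 0 < k then rem.getD (k - 1) 0 else PySem.List.pyGetD rem (-1) 0
  let ds0 := PySem.Int.mod (succ - pos) n
  let ds := min ds0 (n - ds0)
  let dp0 := PySem.Int.mod (pos - pred) n
  let dp := min dp0 (n - dp0)
  if ds < dp then (succ, ds) else if dp < ds then (pred, dp) else (min succ pred, ds)

lemma emod_window (a n : Int) (_hn : 0 < n) (h1 : -n ≤ a) (h2 : a < n) :
    a % n = if 0 ≤ a then a else a + n := by
  split
  · exact Int.emod_eq_of_lt (by omega) h2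
  · have h3 : (a + n) % n = a % n := by
      have h := Int.add_mul_emod_self_left (a := a) (b := n) (c := 1)
      rw [mul_one] at h
      exact h
    have h4 : (a + n) % n = a + n := Int.emod_eq_of_lt (by omega) (by omega)
    omega

lemma abs_sub_ite (t pos : Int) : |t - pos| = if pos ≤ t then t - pos else pos - t := by
  split
  · rw [abs_of_nonneg (by omega)]
  · rw [abs_of_neg (by omega)]; ring

lemma sorted_head_le {l : List Int} (h : l.Pairwise (· < ·)) (hne : l ≠ []) :
    ∀ t ∈ l, l.head hne ≤ t := by
  cases l with
  | nil => exact absurd rfl hne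
  | cons a ts =>
    intro t ht
    rcases List.mem_cons.mp ht with rfl | ht
    · exact le_refl t
    · exact le_of_lt ((List.pairwise_cons.mp h).1 t ht)

lemma sorted_head_lt {l : List Int} (h : l.Pairwise (· < ·)) (hne : l ≠ []) :
    ∀ t ∈ l, t ≠ l.head hne → l.head hne < t := by
  intro t ht hne'
  rcases lt_or_eq_of_le (sorted_head_le h hne t ht) with h' | h'
  · exact h'
  · exact absurd h'.symm hne'

lemma sorted_le_getLast {l : List Int} (h : l.Pairwise (· < ·)) (hne : l ≠ []) :
    ∀ t ∈ l, t ≤ l.getLast hne := by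
  intro t ht
  obtain ⟨i, hi, rfl⟩ := List.mem_iff_getElem.mp ht
  rw [List.getLast_eq_getElem]
  rcases eq_or_lt_of_le (Nat.le_sub_one_of_lt hi) with h' | h'
  · subst h'; exact le_refl _
  · exact le_of_lt ((List.pairwise_iff_getElem.mp h) i (l.length - 1) hi (by omega) h')

lemma sorted_getLast_lt {l : List Int} (h : l.Pairwise (· < ·)) (hne : l ≠ []) :
    ∀ t ∈ l, t ≠ l.getLast hne → t < l.getLast hne := by
  intro t ht hne'
  rcases lt_or_eq_of_le (sorted_le_getLast h hne t ht) with h' | h'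
  · exact h'
  · exact absurd h' hne'

lemma sorted_mem_dropWhile_ge (pos : Int) {l : List Int} (h : l.Pairwise (· < ·)) :
    ∀ t ∈ l.dropWhile (fun t => decide (t < pos)), pos ≤ t := by
  induction l with
  | nil => simp
  | cons a ts ih =>
    intro t ht
    by_cases ha : a < pos
    · rw [List.dropWhile_cons_of_pos (by simpa using ha)] at ht
      exact ih (List.pairwise_cons.mp h).2 t ht
    · rw [List.dropWhile_cons_of_neg (by simpa using ha)] at ht
      rcases List.mem_cons.mp ht with rfl | ht'
      · omega
      · exact le_of_lt (lt_of_le_of_lt (by omega) ((List.pairwise_cons.mp h).1 t ht'))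

lemma find_eq_takeWhile (pos : Int) (l : List Int) :
    solutionAltFind pos l = (l.takeWhile (fun t => decide (t < pos))).length := by
  induction l with
  | nil => rfl
  | cons a ts ih =>
    by_cases ha : a < pos
    · rw [List.takeWhile_cons_of_pos (by simpa using ha)]
      simp [solutionAltFind, ha, ih]
    · rw [List.takeWhile_cons_of_neg (by simpa using ha)]
      simp [solutionAltFind, ha]

lemma circ_min_cw_ccw (n pos t : Int) (hb : 0 ≤ t ∧ t < n) (_hp : 0 ≤ pos ∧ pos < n) :
    circDist n pos t = min (cwD n pos t) (ccwD n pos t) := by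
  simp only [circDist, cwD, ccwD, abs_sub_ite, min_def]
  split_ifs <;> omega

lemma getD_zero_head (l : List Int) (h : l ≠ []) : l.getD 0 0 = l.head h := by
  cases l with
  | nil => exact absurd rfl h
  | cons a ts => rfl

lemma getD_append_len (l₁ l₂ : List Int) (h : l₂ ≠ []) :
    (l₁ ++ l₂).getD l₁.length 0 = l₂.head h := by
  rw [List.getD_eq_getElem?_getD, List.getElem?_append_right (le_refl _), Nat.sub_self,
    ← List.head?_eq_getElem?, List.head?_eq_some_head h]
  rfl

lemma getD_append_last (l₁ l₂ : List Int) (h : l₁ ≠ []) :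
    (l₁ ++ l₂).getD (l₁.length - 1) 0 = l₁.getLast h := by
  have hlen : l₁.length - 1 < l₁.length := by
    cases l₁ with
    | nil => exact absurd rfl h
    | cons a ts => simp
  rw [List.getD_eq_getElem?_getD, List.getElem?_append_left hlen,
    ← List.getLast?_eq_getElem?, List.getLast?_eq_some_getLast h]
  rfl

lemma succ_spec (n pos : Int) (rem : List Int) (hne : rem ≠ [])
    (hsort : rem.Pairwise (· < ·)) (hbd : ∀ t ∈ rem, 0 ≤ t ∧ t < n)
    (_hpos : 0 ≤ pos ∧ pos < n) :
    (if solutionAltFind pos rem < rem.length then rem.getD (solutionAltFind pos rem) 0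
     else rem.getD 0 0) ∈ rem ∧
    (∀ t ∈ rem, t ≠ (if solutionAltFind pos rem < rem.length then rem.getD (solutionAltFind pos rem) 0
     else rem.getD 0 0) → cwD n pos (if solutionAltFind pos rem < rem.length then rem.getD (solutionAltFind pos rem) 0
     else rem.getD 0 0) < cwD n pos t) ∧
    (pos ∈ rem → (if solutionAltFind pos rem < rem.length then rem.getD (solutionAltFind pos rem) 0
     else rem.getD 0 0) = pos) := by
  rw [find_eq_takeWhile]
  set lt := rem.takeWhile (fun t => decide (t < pos)) with hlt
  set ge := rem.dropWhile (fun t => decide (t < pos)) with hge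
  have happ : lt ++ ge = rem := List.takeWhile_append_dropWhile
  have hltmem : ∀ t ∈ lt, t < pos := by
    intro t ht
    simpa using List.mem_takeWhile_imp ht
  have hgemem : ∀ t ∈ ge, pos ≤ t := sorted_mem_dropWhile_ge pos hsort
  have hlen : lt.length + ge.length = rem.length := by
    rw [← happ, List.length_append]
  by_cases hgeE : ge = []
  · -- all targets are below pos; succ wraps to the head of rem
    have hk : lt.length = rem.length := by simp [← hlen, hgeE]
    have hnl : ¬ lt.length < rem.length := by omega
    rw [if_neg hnl, getD_zero_head rem hne]
    have hremlt : ∀ t ∈ rem, t < pos := by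
      intro t ht
      apply hltmem
      rw [← happ, hgeE, List.append_nil] at ht
      exact ht
    refine ⟨List.head_mem hne, ?_, ?_⟩
    · intro t ht htne
      have h1 := hremlt t ht
      have h2 := hremlt _ (List.head_mem hne)
      have h3 := sorted_head_lt hsort hne t ht htne
      simp only [cwD, if_neg (by omega : ¬ pos ≤ rem.head hne), if_neg (by omega : ¬ pos ≤ t)]
      omega
    · intro hp
      exact absurd (hremlt pos hp) (by omega)
  · -- succ is the first remaining target ≥ pos
    have hk : lt.length < rem.length := by
      have : 0 < ge.length := List.length_pos_iff.mpr hgeE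
      omega
    rw [if_pos hk]
    have hsucc : rem.getD lt.length 0 = ge.head hgeE := by
      conv_lhs => rw [← happ]
      exact getD_append_len lt ge hgeE
    rw [hsucc]
    have hgesort : ge.Pairwise (· < ·) := hsort.sublist (List.dropWhile_sublist _)
    have hheadmem : ge.head hgeE ∈ rem := by
      rw [← happ]
      exact List.mem_append_right _ (List.head_mem hgeE)
    have hheadge : pos ≤ ge.head hgeE := hgemem _ (List.head_mem hgeE)
    refine ⟨hheadmem, ?_, ?_⟩
    · intro t ht htne
      rw [← happ] at ht
      rcases List.mem_append.mp ht with htl | htg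
      · have h1 := hltmem t htl
        have h2 := (hbd _ hheadmem).2
        have h3 := (hbd t (happ ▸ ht)).1
        simp only [cwD, if_pos hheadge, if_neg (by omega : ¬ pos ≤ t)]
        omega
      · have h3 := sorted_head_lt hgesort hgeE t htg htne
        simp only [cwD, if_pos hheadge, if_pos (hgemem t htg)]
        omega
    · intro hp
      have hpge : pos ∈ ge := by
        rw [← happ] at hp
        rcases List.mem_append.mp hp with h | h
        · exact absurd (hltmem pos h) (by omega)
        · exact h
      exact le_antisymm (sorted_head_le hgesort hgeE pos hpge) hheadge

lemma pred_spec (n pos : Int) (rem : List Int) (hne : rem ≠ [])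
    (hsort : rem.Pairwise (· < ·)) (hbd : ∀ t ∈ rem, 0 ≤ t ∧ t < n)
    (_hpos : 0 ≤ pos ∧ pos < n) :
    (if 0 < solutionAltFind pos rem then rem.getD (solutionAltFind pos rem - 1) 0
     else PySem.List.pyGetD rem (-1) 0) ∈ rem ∧
    (∀ t ∈ rem, t ≠ (if 0 < solutionAltFind pos rem then rem.getD (solutionAltFind pos rem - 1) 0
     else PySem.List.pyGetD rem (-1) 0) → t ≠ pos →
      ccwD n pos (if 0 < solutionAltFind pos rem then rem.getD (solutionAltFind pos rem - 1) 0
     else PySem.List.pyGetD rem (-1) 0) < ccwD n pos t) := by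
  rw [find_eq_takeWhile]
  set lt := rem.takeWhile (fun t => decide (t < pos)) with hlt
  set ge := rem.dropWhile (fun t => decide (t < pos)) with hge
  have happ : lt ++ ge = rem := List.takeWhile_append_dropWhile
  have hltmem : ∀ t ∈ lt, t < pos := by
    intro t ht
    simpa using List.mem_takeWhile_imp ht
  have hgemem : ∀ t ∈ ge, pos ≤ t := sorted_mem_dropWhile_ge pos hsort
  by_cases hltE : lt = []
  · -- no target below pos: pred wraps to the last target
    have hk : ¬ 0 < lt.length := by simp [hltE]
    rw [if_neg hk, PySem.List.pyGetD_neg_one rem 0 hne]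
    have hrem_ge : ∀ t ∈ rem, pos ≤ t := by
      intro t ht
      apply hgemem
      rw [← happ, hltE, List.nil_append] at ht
      exact ht
    refine ⟨List.getLast_mem hne, ?_⟩
    intro t ht htne htpos
    have h1 : pos < t := lt_of_le_of_ne (hrem_ge t ht) (Ne.symm htpos)
    have h2 : t < rem.getLast hne := sorted_getLast_lt hsort hne t ht htne
    have h3 : pos < rem.getLast hne := lt_trans h1 h2
    simp only [ccwD, if_neg (by omega : ¬ rem.getLast hne ≤ pos), if_neg (by omega : ¬ t ≤ pos)]
    omega
  · -- pred is the last target below pos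
    have hk : 0 < lt.length := List.length_pos_iff.mpr hltE
    rw [if_pos hk]
    have hpred : rem.getD (lt.length - 1) 0 = lt.getLast hltE := by
      conv_lhs => rw [← happ]
      exact getD_append_last lt ge hltE
    rw [hpred]
    have hltsort : lt.Pairwise (· < ·) := hsort.sublist (List.takeWhile_sublist _)
    have hlastmem : lt.getLast hltE ∈ rem := by
      rw [← happ]
      exact List.mem_append_left _ (List.getLast_mem hltE)
    have hlastlt : lt.getLast hltE < pos := hltmem _ (List.getLast_mem hltE)
    refine ⟨hlastmem, ?_⟩
    intro t ht htne htpos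
    have hbt := hbd t ht
    have hbl := hbd _ hlastmem
    rw [← happ] at ht
    rcases List.mem_append.mp ht with htl | htg
    · have h2 : t < lt.getLast hltE := sorted_getLast_lt hltsort hltE t htl htne
      simp only [ccwD, if_pos (le_of_lt hlastlt), if_pos (le_of_lt (hltmem t htl))]
      omega
    · have h1 : pos < t := lt_of_le_of_ne (hgemem t htg) (Ne.symm htpos)
      simp only [ccwD, if_pos (le_of_lt hlastlt), if_neg (by omega : ¬ t ≤ pos)]
      omega

lemma ds_eq_circ (n pos s : Int) (hb : 0 ≤ s ∧ s < n) (hp : 0 ≤ pos ∧ pos < n) :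
    min (PySem.Int.mod (s - pos) n) (n - PySem.Int.mod (s - pos) n) = circDist n pos s := by
  rw [PySem.Int.mod_eq_emod_of_pos (by omega), emod_window _ n (by omega) (by omega) (by omega)]
  simp only [circDist, abs_sub_ite, min_def]
  split_ifs <;> omega

lemma dp_eq_circ (n pos p : Int) (hb : 0 ≤ p ∧ p < n) (hp : 0 ≤ pos ∧ pos < n) :
    min (PySem.Int.mod (pos - p) n) (n - PySem.Int.mod (pos - p) n) = circDist n pos p := by
  rw [PySem.Int.mod_eq_emod_of_pos (by omega), emod_window _ n (by omega) (by omega) (by omega)]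
  simp only [circDist, abs_sub_ite, min_def]
  split_ifs <;> omega

lemma pickStep_spec (n pos : Int) (rem : List Int) (hne : rem ≠ [])
    (hsort : rem.Pairwise (· < ·)) (hbd : ∀ t ∈ rem, 0 ≤ t ∧ t < n)
    (hpos : 0 ≤ pos ∧ pos < n) :
    (pickStep n pos rem).1 ∈ rem ∧
    circDist n pos (pickStep n pos rem).1 = (pickStep n pos rem).2 ∧
    (∀ t ∈ rem, (pickStep n pos rem).2 ≤ circDist n pos t) ∧
    (∀ t ∈ rem, circDist n pos t = (pickStep n pos rem).2 → (pickStep n pos rem).1 ≤ t) := by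
  obtain ⟨hSmem, hScw, hSpos⟩ := succ_spec n pos rem hne hsort hbd hpos
  obtain ⟨hPmem, hPccw⟩ := pred_spec n pos rem hne hsort hbd hpos
  simp only [pickStep]
  set S := (if solutionAltFind pos rem < rem.length then rem.getD (solutionAltFind pos rem) 0
     else rem.getD 0 0) with hSdef
  set P := (if 0 < solutionAltFind pos rem then rem.getD (solutionAltFind pos rem - 1) 0
     else PySem.List.pyGetD rem (-1) 0) with hPdef
  rw [ds_eq_circ n pos S (hbd S hSmem) hpos, dp_eq_circ n pos P (hbd P hPmem) hpos]
  have hstrict : ∀ t ∈ rem, t ≠ S → t ≠ P → min (circDist n pos S) (circDist n pos P) < circDist n pos t := by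
    intro t ht htS htP
    have htpos : t ≠ pos := by
      intro h
      exact htS (h.trans (hSpos (h ▸ ht)).symm)
    have e1 := circ_min_cw_ccw n pos t (hbd t ht) hpos
    have e2 := circ_min_cw_ccw n pos S (hbd S hSmem) hpos
    have e3 := circ_min_cw_ccw n pos P (hbd P hPmem) hpos
    have c1 := hScw t ht htS
    have c2 := hPccw t ht htP htpos
    rw [e1, e2, e3]
    simp only [min_def]
    split_ifs <;> omega
  by_cases h1 : circDist n pos S < circDist n pos P
  · rw [if_pos h1]
    refine ⟨hSmem, rfl, ?_, ?_⟩
    · intro t ht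
      by_cases htS : t = S
      · rw [htS]
      · by_cases htP : t = P
        · rw [htP]; omega
        · have := hstrict t ht htS htP; omega
    · intro t ht hach
      by_cases htS : t = S
      · rw [htS]
      · by_cases htP : t = P
        · rw [htP] at hach; omega
        · have := hstrict t ht htS htP; omega
  · rw [if_neg h1]
    by_cases h2 : circDist n pos P < circDist n pos S
    · rw [if_pos h2]
      refine ⟨hPmem, rfl, ?_, ?_⟩
      · intro t ht
        by_cases htS : t = S
        · rw [htS]; omega
        · by_cases htP : t = P
          · rw [htP]
          · have := hstrict t ht htS htP; omega
      · intro t ht hach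
        by_cases htP : t = P
        · rw [htP]
        · by_cases htS : t = S
          · rw [htS] at hach; omega
          · have := hstrict t ht htS htP; omega
    · rw [if_neg h2]
      have hEq : circDist n pos S = circDist n pos P := by omega
      have hMin : min S P ∈ rem := by
        rcases min_cases S P with ⟨h, _⟩ | ⟨h, _⟩ <;> rw [h]
        · exact hSmem
        · exact hPmem
      have hMinCirc : circDist n pos (min S P) = circDist n pos S := by
        rcases min_cases S P with ⟨h, _⟩ | ⟨h, _⟩ <;> rw [h]
        rw [hEq]
      refine ⟨hMin, hMinCirc, ?_, ?_⟩
      · intro t ht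
        by_cases htS : t = S
        · rw [htS]
        · by_cases htP : t = P
          · rw [htP]; omega
          · have := hstrict t ht htS htP; omega
      · intro t ht hach
        by_cases htS : t = S
        · rw [htS]; exact min_le_left _ _
        · by_cases htP : t = P
          · rw [htP]; exact min_le_right _ _
          · have := hstrict t ht htS htP; omega

lemma scanF_lt (n pos : Int) (m0 j0 t : Int) (h : circDist n pos t < m0) :
    scanF n pos (m0, j0) t = (circDist n pos t, t) := by
  simp only [scanF, circDist] at *
  rw [if_pos h]

lemma scanF_ge (n pos : Int) (m0 j0 t : Int) (h : ¬ circDist n pos t < m0) :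
    scanF n pos (m0, j0) t = (m0, j0) := by
  simp only [scanF, circDist] at *
  rw [if_neg h]

lemma scan_foldl_spec (n pos : Int) (l : List Int) : ∀ (m0 j0 : Int),
    ((∀ t ∈ l, m0 ≤ circDist n pos t) ∧ l.foldl (scanF n pos) (m0, j0) = (m0, j0))
  ∨ (∃ l₁ j l₂, l = l₁ ++ j :: l₂ ∧ circDist n pos j < m0 ∧
      (∀ t ∈ l₁, circDist n pos j < circDist n pos t) ∧
      (∀ t ∈ l₂, circDist n pos j ≤ circDist n pos t) ∧
      l.foldl (scanF n pos) (m0, j0) = (circDist n pos j, j)) := by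
  induction l with
  | nil => intro m0 j0; left; exact ⟨by simp, rfl⟩
  | cons x xs ih =>
    intro m0 j0
    by_cases hx : circDist n pos x < m0
    · rw [show (x :: xs).foldl (scanF n pos) (m0, j0) = xs.foldl (scanF n pos) (circDist n pos x, x) by
        rw [List.foldl_cons, scanF_lt n pos m0 j0 x hx]]
      rcases ih (circDist n pos x) x with ⟨hall, heq⟩ | ⟨l₁, j, l₂, hsplit, hlt, h1, h2, heq⟩
      · exact Or.inr ⟨[], x, xs, rfl, hx, by simp, hall, heq⟩
      · refine Or.inr ⟨x :: l₁, j, l₂, by simp [hsplit], lt_trans hlt hx, ?_, h2, heq⟩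
        intro t ht
        rcases List.mem_cons.mp ht with rfl | ht
        · exact hlt
        · exact h1 t ht
    · rw [show (x :: xs).foldl (scanF n pos) (m0, j0) = xs.foldl (scanF n pos) (m0, j0) by
        rw [List.foldl_cons, scanF_ge n pos m0 j0 x hx]]
      rcases ih m0 j0 with ⟨hall, heq⟩ | ⟨l₁, j, l₂, hsplit, hlt, h1, h2, heq⟩
      · refine Or.inl ⟨?_, heq⟩
        intro t ht
        rcases List.mem_cons.mp ht with rfl | ht
        · exact not_lt.mp hx
        · exact hall t ht
      · refine Or.inr ⟨x :: l₁, j, l₂, by simp [hsplit], hlt, ?_, h2, heq⟩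
        intro t ht
        rcases List.mem_cons.mp ht with rfl | ht
        · exact lt_of_lt_of_le hlt (not_lt.mp hx)
        · exact h1 t ht

lemma altLoop_cons (n : Int) (fuel : Nat) (rem : List Int) (pos horiz : Int) (h : rem ≠ []) :
    solutionAltLoop n (fuel + 1) rem pos horiz
      = solutionAltLoop n fuel (rem.erase (pickStep n pos rem).1) (pickStep n pos rem).1
          (horiz + (pickStep n pos rem).2) := by
  cases rem with
  | nil => exact absurd rfl h
  | cons t ts => rfl

lemma altLoop_acc (n : Int) (fuel : Nat) : ∀ (rem : List Int) (pos h : Int),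
    solutionAltLoop n fuel rem pos h = h + solutionAltLoop n fuel rem pos 0 := by
  induction fuel with
  | zero => intro rem pos h; simp [solutionAltLoop]
  | succ f ih =>
    intro rem pos h
    cases rem with
    | nil => simp [solutionAltLoop]
    | cons t ts =>
      rw [altLoop_cons n f (t :: ts) pos h (by simp), altLoop_cons n f (t :: ts) pos 0 (by simp)]
      rw [ih, ih (((t :: ts).erase (pickStep n pos (t :: ts)).1)) _ (0 + (pickStep n pos (t :: ts)).2)]
      ring

lemma map_getD_range (cs : List Char) (d : Char) :
    (List.range cs.length).map (fun i => cs.getD i d) = cs := by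
  apply List.ext_getElem
  · simp
  · intro i h1 h2
    simp [List.getD_eq_getElem?_getD, List.getElem?_eq_getElem h2]

lemma scan_eq_filter (n pos : Int) (d : PySem.Dict Int Bool) (arr : List Int) :
    solutionScan n pos d arr
      = (arr.filter (fun t => PySem.Dict.getD d t true == false)).foldl (scanF n pos) (n, 0) :=
  PySem.List.foldl_if_eq_foldl_filter (fun t => PySem.Dict.getD d t true == false) (scanF n pos) arr (n, 0)

lemma filter_insert_erase (arr : List Int) (d : PySem.Dict Int Bool) (j : Int)
    (rem : List Int) (hfilt : arr.filter (fun t => PySem.Dict.getD d t true == false) = rem)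
    (hnd : rem.Nodup) :
    arr.filter (fun t => PySem.Dict.getD (PySem.Dict.insert d j true) t true == false)
      = rem.erase j := by
  rw [hnd.erase_eq_filter, ← hfilt, List.filter_filter]
  apply List.filter_congr
  intro t _
  rw [PySem.Dict.getD_insert]
  by_cases h : t = j
  · simp [h]
  · simp [h]

-- the first strict minimum A's scan keeps is exactly B's neighbour choice
lemma scan_result (n pos : Int) (rem : List Int) (hne : rem ≠ [])
    (hsort : rem.Pairwise (· < ·)) (hbd : ∀ t ∈ rem, 0 ≤ t ∧ t < n)
    (hpos : 0 ≤ pos ∧ pos < n) :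
    rem.foldl (scanF n pos) (n, 0) = ((pickStep n pos rem).2, (pickStep n pos rem).1) := by
  obtain ⟨hCm, hCc, hCmin, hCach⟩ := pickStep_spec n pos rem hne hsort hbd hpos
  rcases scan_foldl_spec n pos rem n 0 with ⟨hall, _⟩ | ⟨l₁, j, l₂, hsplit, _, h1, h2, heq⟩
  · exfalso
    have ht0 := List.head_mem hne
    have hb := hbd _ ht0
    have := hall _ ht0
    have habs := abs_sub_ite (rem.head hne) pos
    have : circDist n pos (rem.head hne) ≤ |rem.head hne - pos| := min_le_left _ _
    simp only [circDist] at *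
    omega
  · have hjmem : j ∈ rem := by rw [hsplit]; exact List.mem_append_right _ (List.mem_cons_self)
    have hjle : ∀ t ∈ rem, circDist n pos j ≤ circDist n pos t := by
      intro t ht
      rw [hsplit] at ht
      rcases List.mem_append.mp ht with h | h
      · exact le_of_lt (h1 t h)
      · rcases List.mem_cons.mp h with rfl | h
        · exact le_refl _
        · exact h2 t h
    have hj2 : circDist n pos j = (pickStep n pos rem).2 :=
      le_antisymm (hCc ▸ hjle _ hCm) (hCmin j hjmem)
    have hle1 : (pickStep n pos rem).1 ≤ j := hCach j hjmem hj2
    have hle2 : j ≤ (pickStep n pos rem).1 := by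
      have hm : (pickStep n pos rem).1 ∈ l₁ ++ j :: l₂ := by rw [← hsplit]; exact hCm
      rcases List.mem_append.mp hm with h | h
      · exfalso
        have := h1 _ h
        omega
      · rcases List.mem_cons.mp h with h' | h'
        · omega
        · have hp : List.Pairwise (· < ·) (j :: l₂) := ((List.pairwise_append.mp (hsplit ▸ hsort)).2.1)
          exact le_of_lt ((List.pairwise_cons.mp hp).1 _ h')
    have : (pickStep n pos rem).1 = j := le_antisymm hle1 hle2
    rw [heq, ← this, hCc]

-- loop bisimulation
lemma loop_eq (cs : List Char) (arr : List Int)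
    (harr : ∀ t ∈ arr, 0 ≤ t ∧ t < (cs.length : Int)) :
    ∀ (N : Nat) (rem : List Int) (d : PySem.Dict Int Bool) (pos a : Int),
      rem.length = N →
      arr.filter (fun t => PySem.Dict.getD d t true == false) = rem →
      rem.Pairwise (· < ·) →
      (rem ≠ [] → 0 ≤ pos ∧ pos < (cs.length : Int)) →
      solutionLoop cs arr N a pos d
        = a + (rem.map (vertAt cs)).sum + solutionAltLoop (cs.length : Int) N rem pos 0 := by
  intro N
  induction N with
  | zero =>
    intro rem d pos a hlen hfilt hsort hpos
    have h0 : rem = [] := List.eq_nil_of_length_eq_zero hlen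
    subst h0
    simp [solutionLoop, solutionAltLoop]
  | succ N ih =>
    intro rem d pos a hlen hfilt hsort hpos
    have hne : rem ≠ [] := by intro h; subst h; simp at hlen
    have hbd : ∀ t ∈ rem, 0 ≤ t ∧ t < (cs.length : Int) := by
      intro t ht
      rw [← hfilt] at ht
      exact harr t (List.mem_of_mem_filter ht)
    have hpos' := hpos hne
    have hscan : solutionScan (cs.length : Int) pos d arr
        = ((pickStep (cs.length : Int) pos rem).2, (pickStep (cs.length : Int) pos rem).1) := by
      rw [scan_eq_filter, hfilt]
      exact scan_result _ pos rem hne hsort hbd hpos'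
    have hpkmem : (pickStep (cs.length : Int) pos rem).1 ∈ rem :=
      (pickStep_spec _ pos rem hne hsort hbd hpos').1
    have hnd : rem.Nodup := List.Pairwise.imp ne_of_lt hsort
    have hfilt' : arr.filter (fun t =>
        PySem.Dict.getD (PySem.Dict.insert d (pickStep (cs.length : Int) pos rem).1 true) t true == false)
        = rem.erase (pickStep (cs.length : Int) pos rem).1 :=
      filter_insert_erase arr d _ rem hfilt hnd
    have hlen' : (rem.erase (pickStep (cs.length : Int) pos rem).1).length = N := by
      rw [List.length_erase_of_mem hpkmem, hlen]
      omega
    have hsort' : (rem.erase (pickStep (cs.length : Int) pos rem).1).Pairwise (· < ·) :=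
      hsort.sublist (List.erase_sublist ..)
    have hpos'' : rem.erase (pickStep (cs.length : Int) pos rem).1 ≠ [] →
        0 ≤ (pickStep (cs.length : Int) pos rem).1 ∧ (pickStep (cs.length : Int) pos rem).1 < (cs.length : Int) :=
      fun _ => hbd _ hpkmem
    have hstep : solutionLoop cs arr (N + 1) a pos d
        = solutionLoop cs arr N (a + (pickStep (cs.length : Int) pos rem).2
            + vertAt cs (pickStep (cs.length : Int) pos rem).1)
            (pickStep (cs.length : Int) pos rem).1
            (PySem.Dict.insert d (pickStep (cs.length : Int) pos rem).1 true) := by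
      simp only [solutionLoop, hscan, vertAt]
    rw [hstep, ih _ _ _ _ hlen' hfilt' hsort' hpos'']
    rw [altLoop_cons _ N rem pos 0 hne]
    rw [altLoop_acc ((cs.length : Int)) N (rem.erase (pickStep (cs.length : Int) pos rem).1)
      (pickStep (cs.length : Int) pos rem).1 (0 + (pickStep (cs.length : Int) pos rem).2)]
    have hperm : (rem.map (vertAt cs)).sum
        = vertAt cs (pickStep (cs.length : Int) pos rem).1
          + ((rem.erase (pickStep (cs.length : Int) pos rem).1).map (vertAt cs)).sum := by
      have hp := (List.perm_cons_erase hpkmem).map (vertAt cs)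
      rw [hp.sum_eq]
      simp
    rw [hperm]
    ring

-- A's build loop: the target array is the filtered range and every target is unvisited
lemma build_spec (cs : List Char) : ∀ (l : List Nat) (a0 : List Int) (d0 : PySem.Dict Int Bool),
    (l.foldl (fun (st : List Int × PySem.Dict Int Bool) i =>
        if cs.getD i 'A' ≠ 'A' then (st.1 ++ [(i : Int)], PySem.Dict.insert st.2 (i : Int) false)
        else st) (a0, d0)).1
      = a0 ++ (l.filter (fun i => cs.getD i 'A' ≠ 'A')).map (fun (i : Nat) => (i : Int))
    ∧ ∀ t : Int, PySem.Dict.getD (l.foldl (fun (st : List Int × PySem.Dict Int Bool) i =>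
        if cs.getD i 'A' ≠ 'A' then (st.1 ++ [(i : Int)], PySem.Dict.insert st.2 (i : Int) false)
        else st) (a0, d0)).2 t true
      = if t ∈ (l.filter (fun i => cs.getD i 'A' ≠ 'A')).map (fun (i : Nat) => (i : Int)) then false
        else PySem.Dict.getD d0 t true := by
  intro l
  induction l with
  | nil => intro a0 d0; exact ⟨by simp, by simp⟩
  | cons i l ih =>
    intro a0 d0
    by_cases hp : cs.getD i 'A' ≠ 'A'
    · have hfil : (i :: l).filter (fun i => cs.getD i 'A' ≠ 'A')
          = i :: l.filter (fun i => cs.getD i 'A' ≠ 'A') :=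
        List.filter_cons_of_pos (decide_eq_true hp)
      obtain ⟨h1, h2⟩ := ih (a0 ++ [(i : Int)]) (PySem.Dict.insert d0 (i : Int) false)
      constructor
      · simp only [List.foldl_cons, if_pos hp, hfil]
        rw [h1]
        simp
      · intro t
        simp only [List.foldl_cons, if_pos hp, hfil]
        rw [h2 t, PySem.Dict.getD_insert, List.map_cons]
        by_cases ht : t ∈ (l.filter (fun i => cs.getD i 'A' ≠ 'A')).map (fun (i : Nat) => (i : Int))
        · rw [if_pos ht, if_pos (List.mem_cons_of_mem _ ht)]
        · rw [if_neg ht]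
          by_cases hti : t = (i : Int)
          · rw [if_pos hti, if_pos (by rw [hti]; exact List.mem_cons_self)]
          · rw [if_neg hti, if_neg (by
              intro h
              rcases List.mem_cons.mp h with h | h
              · exact hti h
              · exact ht h)]
    · have hfil : (i :: l).filter (fun i => cs.getD i 'A' ≠ 'A')
          = l.filter (fun i => cs.getD i 'A' ≠ 'A') :=
        List.filter_cons_of_neg (by simp only [decide_eq_true_eq]; exact hp)
      obtain ⟨h1, h2⟩ := ih a0 d0
      constructor
      · simp only [List.foldl_cons, if_neg hp, hfil]
        exact h1
      · intro t
        simp only [List.foldl_cons, if_neg hp, hfil]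
        exact h2 t

-- B's one-pass vertical sum equals the sum of A's per-visit vertical costs over all targets
lemma vertical_eq (cs : List Char) :
    cs.foldl (fun acc c => if c ≠ 'A' then acc + min ((c.toNat : Int) - 65) (91 - (c.toNat : Int)) else acc) 0
      = ((((List.range cs.length).filter (fun i => cs.getD i 'A' ≠ 'A')).map
          (fun (i : Nat) => (i : Int))).map (vertAt cs)).sum := by
  rw [PySem.List.foldl_ite_eq_foldl_filter (fun c => c ≠ 'A')
    (fun acc c => acc + min ((c.toNat : Int) - 65) (91 - (c.toNat : Int))) cs 0]
  rw [PySem.List.foldl_add]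
  have hcs : cs.filter (fun c => decide (c ≠ 'A'))
      = ((List.range cs.length).filter (fun i => cs.getD i 'A' ≠ 'A')).map (fun i => cs.getD i 'A') := by
    conv_lhs => rw [← map_getD_range cs 'A']
    rw [List.filter_map]
    rfl
  rw [hcs, List.map_map, List.map_map]
  simp only [zero_add]
  congr 1
  apply List.map_congr_left
  intro i hi
  simp [vertAt]

-- ===== VERDICT (by name: the statement is the Claim_ definition above) =====
theorem solution_spec : Claim_equal_solution := by
  unfold Claim_equal_solution
  intro name _
  unfold Spec_solution solution solution_alt
  simp only []
  set cs := name.toList with hcs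
  obtain ⟨h1, h2⟩ := build_spec cs (List.range cs.length) [] PySem.Dict.empty
  set st := (List.range cs.length).foldl (fun (st : List Int × PySem.Dict Int Bool) i =>
      if cs.getD i 'A' ≠ 'A' then (st.1 ++ [(i : Int)], PySem.Dict.insert st.2 (i : Int) false)
      else st) ([], PySem.Dict.empty) with hst
  set T := ((List.range cs.length).filter (fun i => cs.getD i 'A' ≠ 'A')).map (fun (i : Nat) => (i : Int)) with hT
  rw [List.nil_append] at h1
  have hbnd : ∀ t ∈ T, 0 ≤ t ∧ t < (cs.length : Int) := by
    intro t ht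
    rw [hT] at ht
    obtain ⟨i, hi, rfl⟩ := List.mem_map.mp ht
    have := List.mem_range.mp (List.mem_of_mem_filter hi)
    omega
  have hsortT : T.Pairwise (· < ·) := by
    rw [hT]
    rw [List.pairwise_map]
    exact (List.pairwise_lt_range.filter _).imp (by intro a b h; exact_mod_cast h)
  have hfilt0 : T.filter (fun t => PySem.Dict.getD st.2 t true == false) = T := by
    apply List.filter_eq_self.mpr
    intro t ht
    rw [h2 t, if_pos ht]
    rfl
  have hloop := loop_eq cs T (by intro t ht; exact hbnd t ht) T.length T st.2 0 0 rfl
    hfilt0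
    hsortT
    (by intro hne; obtain ⟨t, ht⟩ := List.exists_mem_of_ne_nil T hne; have := hbnd t ht; omega)
  rw [h1, hloop, vertical_eq cs, ← hT]
  ring
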